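-- pv_equiv track=rewrite | github.com/jeswanth560/Nirvahak | python/run_files.py | collect_all_prerequisites
-- ===== SOURCE A (Python) =====
-- from typing import Dict, List, Set
--
-- def collect_all_prerequisites(dependencies: Dict[str, List[str]], target: str) -> Set[str]:
--     """
--     Returns all files that must run before target (recursive).
--     """
--     visited: Set[str] = set()
--
--     def dfs(file: str):
--         for dep in dependencies.get(file, []):
--             if dep not in visited:
--                 visited.add(dep)
--                 dfs(dep)
--
--     dfs(target)
--     return visited
-- ===== SOURCE B (Python) =====
-- def collect_all_prerequisites(dependencies, target):
--     """
--     Returns all files that must run before target (recursive).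
--     Iterative DFS: an explicit stack of node names (no recursion).
--     Children are pushed in reverse so they are popped in source order;
--     a node is marked visited when it is popped.
--     """
--     visited = set()
--     stack = list(reversed(dependencies.get(target, [])))
--     while stack:
--         node = stack.pop()
--         if node not in visited:
--             visited.add(node)
--             stack.extend(reversed(dependencies.get(node, [])))
--     return visited
-- ===== Notes on version B (the rewrite author's own statement) =====
-- stated objective: idiomatic
-- what changed: The nested recursive dfs helper is replaced by the standard iterative depth-first traversal: an explicit stack of node names, children pushed in reverse and nodes marked visited at pop time, with no recursion and no inner function.
import Mathlib
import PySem

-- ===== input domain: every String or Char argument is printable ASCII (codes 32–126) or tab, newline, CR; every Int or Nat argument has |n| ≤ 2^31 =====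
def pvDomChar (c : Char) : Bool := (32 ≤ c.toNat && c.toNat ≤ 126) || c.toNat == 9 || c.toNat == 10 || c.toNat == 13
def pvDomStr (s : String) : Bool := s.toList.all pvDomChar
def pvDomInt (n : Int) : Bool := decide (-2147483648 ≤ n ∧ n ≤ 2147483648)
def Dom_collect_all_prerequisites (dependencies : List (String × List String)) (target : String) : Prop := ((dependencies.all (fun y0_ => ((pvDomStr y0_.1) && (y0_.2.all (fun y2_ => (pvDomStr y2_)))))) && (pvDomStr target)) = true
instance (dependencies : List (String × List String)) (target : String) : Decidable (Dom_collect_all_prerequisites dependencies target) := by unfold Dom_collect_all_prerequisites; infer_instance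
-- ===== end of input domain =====

-- B replaces A's nested recursive dfs by the standard iterative DFS with an explicit node stack (children pushed in reverse, marked at pop); objective: idiomatic.


-- ===== PORT A =====
-- dependencies.get(file, [])
def pvGetDeps (deps : List (String × List String)) (f : String) : List String :=
  PySem.Dict.getD (PySem.Dict.mk deps) f []

-- every name occurring in the mapping (keys and values); sizes the fuel below and B's termination measure
def pvUniv (deps : List (String × List String)) : List String :=
  deps.map Prod.fst ++ deps.flatMap Prod.snd

-- internal fuel making A's (graph-)recursion structural; proved sufficient below
def pvFuel (deps : List (String × List String)) : Nat :=
  ((pvUniv deps).length + 3) * ((pvUniv deps).length + 3)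

-- the inner 'dfs': for dep in dependencies.get(file, []): if dep not in visited: visited.add(dep); dfs(dep)
def pvDfsA (deps : List (String × List String)) : Nat → List String → PySem.Set String → PySem.Set String
  | 0, _, v => v
  | _ + 1, [], v => v
  | f + 1, d :: rest, v =>
    if d ∈ v then pvDfsA deps f rest v
    else pvDfsA deps f rest (pvDfsA deps f (pvGetDeps deps d) (PySem.Set.add v d))

def collect_all_prerequisites (dependencies : List (String × List String)) (target : String) : List String :=
  pvDfsA dependencies (pvFuel dependencies) (pvGetDeps dependencies target) PySem.Set.empty

-- ===== PORT B =====
-- number of not-yet-visited names of the mapping: B's primary termination measure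
def pvMu (deps : List (String × List String)) (v : PySem.Set String) : Nat :=
  ((pvUniv deps).filter (fun x => !(decide (x ∈ v)))).length

theorem pvFilter_mono (l v w : List String) (h : ∀ x, x ∈ v → x ∈ w) :
    (l.filter (fun x => !(decide (x ∈ w)))).length ≤ (l.filter (fun x => !(decide (x ∈ v)))).length := by
  induction l with
  | nil => simp
  | cons a t ih =>
    by_cases ha : a ∈ w
    · by_cases hv : a ∈ v <;> simp [ha, hv] <;> omega
    · have hv : a ∉ v := fun hx => ha (h a hx)
      simp [ha, hv]
      omega

theorem pvFilter_add (l : List String) (v : PySem.Set String) (d : String) (hd : d ∈ l) (hv : d ∉ v) :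
    (l.filter (fun x => !(decide (x ∈ PySem.Set.add v d)))).length + 1 ≤ (l.filter (fun x => !(decide (x ∈ v)))).length := by
  induction l with
  | nil => simp at hd
  | cons a t ih =>
    by_cases had : a = d
    · subst had
      have hpa : (!decide (a ∈ PySem.Set.add v a)) = false := by simp [PySem.Set.mem_add]
      have hqa : (!decide (a ∈ v)) = true := by simp [hv]
      simp only [List.filter_cons, hpa, hqa, Bool.false_eq_true, if_true, if_false, List.length_cons]
      have := pvFilter_mono t v (PySem.Set.add v a) (fun x hx => by simp [PySem.Set.mem_add]; exact Or.inl hx)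
      omega
    · have hd' : d ∈ t := by
        rcases List.mem_cons.mp hd with h' | h'
        · exact absurd h'.symm had
        · exact h'
      have hmem : (a ∈ PySem.Set.add v d) ↔ a ∈ v := by
        simp [PySem.Set.mem_add]; intro h'; exact absurd h' had
      by_cases hav : a ∈ v
      · have hpa : (!decide (a ∈ PySem.Set.add v d)) = false := by simp [hmem.mpr hav]
        have hqa : (!decide (a ∈ v)) = false := by simp [hav]
        simp only [List.filter_cons, hpa, hqa, Bool.false_eq_true, if_false]
        exact ih hd'
      · have hpa : (!decide (a ∈ PySem.Set.add v d)) = true := by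
          simp [PySem.Set.mem_add]; exact ⟨hav, had⟩
        have hqa : (!decide (a ∈ v)) = true := by simp [hav]
        simp only [List.filter_cons, hpa, hqa, if_true, List.length_cons]
        have := ih hd'
        omega

theorem pvMu_add (deps : List (String × List String)) (v : PySem.Set String) (d : String)
    (hd : d ∈ pvUniv deps) (hv : d ∉ v) : pvMu deps (PySem.Set.add v d) + 1 ≤ pvMu deps v :=
  pvFilter_add (pvUniv deps) v d hd hv

theorem pvMu_add_eq (deps : List (String × List String)) (v : PySem.Set String) (d : String)
    (hd : d ∉ pvUniv deps) : pvMu deps (PySem.Set.add v d) = pvMu deps v := by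
  unfold pvMu
  congr 1
  apply List.filter_congr
  intro x hx
  have hxd : x ≠ d := fun h => hd (h ▸ hx)
  simp [PySem.Set.mem_add, hxd]

theorem pvGetDeps_of_not_mem (deps : List (String × List String)) (d : String)
    (hd : d ∉ pvUniv deps) : pvGetDeps deps d = [] := by
  have hk : d ∉ deps.map Prod.fst := fun h => hd (by simp [pvUniv]; exact Or.inl (by simpa using h))
  unfold pvGetDeps
  induction deps with
  | nil => simp [PySem.Dict.getD, PySem.Dict.get?]
  | cons p rest ih =>
    rcases p with ⟨k, vs⟩
    rw [PySem.Dict.getD_eq_get?_getD, PySem.Dict.get?_mk_cons]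
    have hkd : ¬ (k == d) = true := by
      simp only [beq_iff_eq]
      intro h; exact hk (by simp [h])
    rw [if_neg hkd]
    rw [← PySem.Dict.getD_eq_get?_getD]
    exact ih (fun h => hd (by simp [pvUniv] at h ⊢; tauto)) (fun h => hk (by simp at h ⊢; tauto))

-- the while loop: pop the top name; if unvisited, mark it and push its deps (reversed in Python,
-- so with head-of-list = top of stack the pushed block is exactly pvGetDeps deps d)
def pvLoopB (deps : List (String × List String)) : List String → PySem.Set String → PySem.Set String
  | [], v => v
  | d :: st, v =>
    if h : d ∈ v then pvLoopB deps st v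
    else pvLoopB deps (pvGetDeps deps d ++ st) (PySem.Set.add v d)
termination_by st v => (pvMu deps v, st.length)
decreasing_by
  · exact Prod.Lex.right _ (Nat.lt_succ_self _)
  · by_cases hd : d ∈ pvUniv deps
    · exact Prod.Lex.left _ _ (by have := pvMu_add deps v d hd h; omega)
    · rw [pvGetDeps_of_not_mem deps d hd, pvMu_add_eq deps v d hd]
      exact Prod.Lex.right _ (Nat.lt_succ_self _)

def collect_all_prerequisites_alt (dependencies : List (String × List String)) (target : String) : List String :=
  pvLoopB dependencies (pvGetDeps dependencies target) PySem.Set.empty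

-- ===== PRECONDITION & SPEC =====
def Spec_collect_all_prerequisites (dependencies : List (String × List String)) (target : String) (out : List String) : Prop := out = collect_all_prerequisites_alt dependencies target
instance (dependencies : List (String × List String)) (target : String) (out : List String) : Decidable (Spec_collect_all_prerequisites dependencies target out) := by unfold Spec_collect_all_prerequisites; infer_instance

-- ===== CLAIM (what is proved, stated in full; the proofs are below) =====
def Claim_equal_collect_all_prerequisites : Prop := ∀ (dependencies : List (String × List String)) (target : String), Dom_collect_all_prerequisites dependencies target → Spec_collect_all_prerequisites dependencies target (collect_all_prerequisites dependencies target)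

-- ===== LEMMAS AND PROOFS =====

-- all dependency names occurring as values
def pvU (deps : List (String × List String)) : List String := deps.flatMap Prod.snd

theorem pvMem_getDeps (deps : List (String × List String)) (f : String) :
    ∀ x ∈ pvGetDeps deps f, x ∈ pvU deps := by
  unfold pvGetDeps pvU
  induction deps with
  | nil => simp [PySem.Dict.getD, PySem.Dict.get?]
  | cons p rest ih =>
    intro x hx
    rw [PySem.Dict.getD_eq_get?_getD] at hx
    rcases p with ⟨k, vs⟩
    rw [PySem.Dict.get?_mk_cons] at hx
    by_cases h : k == f
    · simp [h] at hx; simp [hx]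
    · simp [h] at hx
      have := ih x
      rw [PySem.Dict.getD_eq_get?_getD] at this
      simp [hx] at this ⊢
      exact Or.inr this

theorem pvU_sub_univ (deps : List (String × List String)) :
    ∀ x ∈ pvU deps, x ∈ pvUniv deps := by
  intro x hx; simp [pvUniv, pvU] at hx ⊢; tauto

theorem pvLen_getDepsU (deps : List (String × List String)) (f : String) :
    (pvGetDeps deps f).length ≤ (pvU deps).length := by
  unfold pvGetDeps pvU
  induction deps with
  | nil => simp [PySem.Dict.getD, PySem.Dict.get?]
  | cons p rest ih =>
    rw [PySem.Dict.getD_eq_get?_getD]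
    rcases p with ⟨k, vs⟩
    rw [PySem.Dict.get?_mk_cons]
    by_cases h : k == f
    · simp [h]
    · simp [h]
      rw [PySem.Dict.getD_eq_get?_getD] at ih
      simp [List.length_flatMap] at ih ⊢
      omega

theorem pvLen_getDeps (deps : List (String × List String)) (f : String) :
    (pvGetDeps deps f).length ≤ (pvUniv deps).length := by
  have h2 : (pvU deps).length ≤ (pvUniv deps).length := by
    simp [pvUniv, pvU]
  have h1 := pvLen_getDepsU deps f
  omega

theorem pvMu_mono (deps : List (String × List String)) (v w : PySem.Set String)
    (h : ∀ x, x ∈ v → x ∈ w) : pvMu deps w ≤ pvMu deps v :=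
  pvFilter_mono (pvUniv deps) v w h

theorem pvDfsA_mono (deps : List (String × List String)) :
    ∀ (f : Nat) (l : List String) (v : PySem.Set String) (x : String), x ∈ v → x ∈ pvDfsA deps f l v := by
  intro f
  induction f with
  | zero => intro l v x h; simpa [pvDfsA] using h
  | succ f ih =>
    intro l v x h
    cases l with
    | nil => simpa [pvDfsA] using h
    | cons d rest =>
      by_cases hd : d ∈ v
      · simpa [pvDfsA, hd] using ih rest v x h
      · have h1 : x ∈ PySem.Set.add v d := by simp [PySem.Set.mem_add]; exact Or.inl h
        simpa [pvDfsA, hd] using ih rest _ x (ih (pvGetDeps deps d) _ x h1)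

-- the bridge: running B's loop on a pending block l (above any stack st) equals first
-- running A's dfs on l and continuing with st, provided A has enough fuel
theorem pvBridge (deps : List (String × List String)) :
    ∀ (f : Nat) (l : List String) (v : PySem.Set String) (st : List String),
      (∀ x ∈ l, x ∈ pvU deps) →
      pvMu deps v * ((pvUniv deps).length + 2) + l.length + 1 ≤ f →
      pvLoopB deps (l ++ st) v = pvLoopB deps st (pvDfsA deps f l v) := by
  intro f
  induction f with
  | zero => intro l v st _ hneed; omega
  | succ f ih =>
    intro l v st hl hneed
    cases l with
    | nil => simp [pvDfsA]
    | cons d rest =>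
      simp only [List.length_cons] at hneed
      have hrest : ∀ x ∈ rest, x ∈ pvU deps := fun x hx => hl x (List.mem_cons_of_mem _ hx)
      by_cases hd : d ∈ v
      · rw [List.cons_append, pvLoopB]
        simp only [hd, dif_pos]
        rw [ih rest v st hrest (by omega)]
        simp [pvDfsA, hd]
      · rw [List.cons_append, pvLoopB]
        simp only [hd, dif_neg, not_false_iff]
        have hdU : d ∈ pvUniv deps := pvU_sub_univ deps d (hl d List.mem_cons_self)
        have hμa := pvMu_add deps v d hdU hd
        have hg := pvLen_getDeps deps d
        have hmulA := Nat.mul_le_mul_right ((pvUniv deps).length + 2) hμa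
        rw [Nat.add_mul, Nat.one_mul] at hmulA
        rw [ih (pvGetDeps deps d) (PySem.Set.add v d) (rest ++ st)
            (pvMem_getDeps deps d) (by omega)]
        have hμ1 : pvMu deps (pvDfsA deps f (pvGetDeps deps d) (PySem.Set.add v d)) ≤ pvMu deps (PySem.Set.add v d) :=
          pvMu_mono deps _ _ (pvDfsA_mono deps f _ _)
        have hmul1 := Nat.mul_le_mul_right ((pvUniv deps).length + 2) hμ1
        rw [ih rest (pvDfsA deps f (pvGetDeps deps d) (PySem.Set.add v d)) st hrest (by omega)]
        simp [pvDfsA, hd]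

-- ===== VERDICT (by name: the statement is the Claim_ definition above) =====
theorem collect_all_prerequisites_spec : Claim_equal_collect_all_prerequisites := by
  intro deps target _
  unfold Spec_collect_all_prerequisites collect_all_prerequisites collect_all_prerequisites_alt
  have hμ : pvMu deps PySem.Set.empty ≤ (pvUniv deps).length := List.length_filter_le _ _
  have hmul : pvMu deps PySem.Set.empty * ((pvUniv deps).length + 2)
      ≤ (pvUniv deps).length * ((pvUniv deps).length + 2) := Nat.mul_le_mul_right _ hμ
  have hg := pvLen_getDeps deps target
  have hsq : ((pvUniv deps).length + 3) * ((pvUniv deps).length + 3)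
      = (pvUniv deps).length * ((pvUniv deps).length + 2) + 4 * (pvUniv deps).length + 9 := by ring
  have hF : pvMu deps PySem.Set.empty * ((pvUniv deps).length + 2) + (pvGetDeps deps target).length + 1
      ≤ pvFuel deps := by
    simp only [pvFuel, hsq]; omega
  have h := pvBridge deps (pvFuel deps) (pvGetDeps deps target) PySem.Set.empty []
      (pvMem_getDeps deps target) hF
  simp only [List.append_nil] at h
  rw [h, pvLoopB]
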